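-- pv_equiv track=rewrite | github.com/HMFlol/EverybodyCodes | 2024/Quest1/quest1-3.py | potion_master
-- ===== SOURCE A (Python) =====
-- def potion_master(data):
--     # Point values based on x count
--     points = {
--         0: {"A": 2, "B": 3, "C": 5, "D": 7},
--         1: {"A": 1, "B": 2, "C": 4, "D": 6},
--         2: {"A": 0, "B": 1, "C": 3, "D": 5},
--     }
--
--     total = 0
--
--     for i in range(0, len(data), 3):
--         trio = data[i : i + 3]
--         xes = trio.count("x")
--
--         for char in trio:
--             if char != "x":
--                 total += points[xes][char]
--
--     return total
-- ===== SOURCE B (Python) =====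
-- def _pen(chars):
--     # number of pairs within `chars` consisting of one "x" and one non-"x"
--     if not chars:
--         return 0
--     head, rest = chars[0], chars[1:]
--     return sum(1 for c in rest if (c == "x") != (head == "x")) + _pen(rest)
--
-- def potion_master(data):
--     # single 1-D base map; each chunk scores sum(base) minus the count of
--     # mixed ("x", non-"x") pairs inside the chunk
--     base = {"A": 2, "B": 3, "C": 5, "D": 7, "x": 0}
--     total = 0
--     i = 0
--     while i < len(data):
--         trio = data[i : i + 3]
--         total += sum(base[c] for c in trio) - _pen(trio)
--         i += 3
--     return total
-- ===== Notes on version B (the rewrite author's own statement) =====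
-- stated objective: alternative
-- what changed: Replaces the 2-D x-count-indexed points table with a pair-interaction formulation: each chunk scores the sum of a single 1-D base map (with x worth 0) minus the number of mixed (x, non-x) pairs inside the chunk, computed by a recursive pairwise helper; no x-count lookup table remains.
import Mathlib
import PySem

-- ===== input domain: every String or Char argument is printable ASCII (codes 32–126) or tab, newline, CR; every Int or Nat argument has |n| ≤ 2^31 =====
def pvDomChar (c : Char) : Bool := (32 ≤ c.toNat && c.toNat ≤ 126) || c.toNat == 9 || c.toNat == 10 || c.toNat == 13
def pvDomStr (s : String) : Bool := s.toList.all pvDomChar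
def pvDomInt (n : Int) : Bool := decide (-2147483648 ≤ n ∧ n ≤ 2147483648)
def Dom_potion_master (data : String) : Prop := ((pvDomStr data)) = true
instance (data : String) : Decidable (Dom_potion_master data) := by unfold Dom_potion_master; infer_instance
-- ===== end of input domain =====

-- B replaces A's 2-D x-count-indexed points table by a 1-D base map (x worth 0)
-- minus the count of mixed (x, non-x) pairs inside each chunk (alternative algorithm).

-- ===== PORT A =====
def pvPointsA : PySem.Dict Int (PySem.Dict Char Int) :=
  PySem.Dict.ofList
    [(0, PySem.Dict.ofList [('A', 2), ('B', 3), ('C', 5), ('D', 7)]),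
     (1, PySem.Dict.ofList [('A', 1), ('B', 2), ('C', 4), ('D', 6)]),
     (2, PySem.Dict.ofList [('A', 0), ('B', 1), ('C', 3), ('D', 5)])]

-- points[xes][char]; Python raises KeyError on characters other than the five potion letters — excluded by Pre_ (getD default never read inside Pre_)
def pvLookupA (xes : Int) (c : Char) : Int :=
  PySem.Dict.getD (PySem.Dict.getD pvPointsA xes PySem.Dict.empty) c 0

def potion_master (data : String) : Int :=
  let cs := data.toList
  (PySem.List.pyRange 0 (PySem.List.len cs) 3).foldl
    (fun total i =>
      let trio := PySem.List.slice cs (some i) (some (i + 3))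
      let xes : Int := (PySem.List.count trio 'x' : Int)
      trio.foldl (fun t c => if c ≠ 'x' then t + pvLookupA xes c else t) total)
    0

-- ===== PORT B =====
def pvBaseB : PySem.Dict Char Int :=
  PySem.Dict.ofList [('A', 2), ('B', 3), ('C', 5), ('D', 7), ('x', 0)]

-- _pen: number of pairs consisting of one 'x' and one non-'x' ("sum(1 for c in rest if …)" is a count)
def pvPen : List Char → Int
  | [] => 0
  | h :: t => (t.countP (fun c => (c == 'x') != (h == 'x')) : Int) + pvPen t

-- the while loop: i advances by 3 until i < len(data) fails
def pvAltLoop (cs : List Char) (total : Int) (i : Int) : Int :=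
  if _h : i < (cs.length : Int) then
    let trio := PySem.List.slice cs (some i) (some (i + 3))
    pvAltLoop cs (total + ((trio.map (fun c => PySem.Dict.getD pvBaseB c 0)).sum - pvPen trio)) (i + 3)
  else total
termination_by ((cs.length : Int) - i).toNat
decreasing_by omega

def potion_master_alt (data : String) : Int :=
  pvAltLoop data.toList 0 0

-- ===== PRECONDITION & SPEC =====
-- Pre_ is exactly the inputs on which Python A returns: any character other than the five potion letters makes A raise KeyError.
def Pre_potion_master (data : String) : Prop :=
  (data.toList.all (fun c => c == 'A' || c == 'B' || c == 'C' || c == 'D' || c == 'x')) = true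
instance (data : String) : Decidable (Pre_potion_master data) := by
  unfold Pre_potion_master; infer_instance
def pvWitness_potion_master : String := "ABxDxC"

def Spec_potion_master (data : String) (out : Int) : Prop := out = potion_master_alt data
instance (data : String) (out : Int) : Decidable (Spec_potion_master data out) := by
  unfold Spec_potion_master; infer_instance

-- ===== CLAIM (what is proved, stated in full; the proofs are below) =====
def Claim_equal_potion_master : Prop :=
  ∀ (data : String), Dom_potion_master data → Pre_potion_master data →
    Spec_potion_master data (potion_master data)

-- ===== LEMMAS AND PROOFS =====

-- A's per-chunk contribution as a mapped sum over the range indices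
def pvChunkA (cs : List Char) (i : Int) : Int :=
  let trio := PySem.List.slice cs (some i) (some (i + 3))
  (trio.map (fun c => if c ≠ 'x' then pvLookupA (trio.count 'x' : Int) c else 0)).sum

-- B's per-chunk contribution
def pvChunkB (cs : List Char) (i : Int) : Int :=
  let trio := PySem.List.slice cs (some i) (some (i + 3))
  (trio.map (fun c => PySem.Dict.getD pvBaseB c 0)).sum - pvPen trio

-- cons form of range(a, b, s) for a positive step
lemma pvRange_cons_of_pos (a b s : Int) (hs : 0 < s) (hab : a < b) :
    PySem.List.pyRange a b s = a :: PySem.List.pyRange (a + s) b s := by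
  rw [PySem.List.pyRange_of_pos _ _ hs, PySem.List.pyRange_of_pos _ _ hs]
  have hd : 0 ≤ b - a - 1 := by omega
  have h1 : (b - a + s - 1) / s = (b - a - 1) / s + 1 := by
    have : b - a + s - 1 = (b - a - 1) + 1 * s := by ring
    rw [this, Int.add_mul_ediv_right _ _ (by omega : s ≠ 0)]
  have hc1 : ((b - a + s - 1) / s).toNat = ((b - a - 1) / s).toNat + 1 := by
    have h0 : 0 ≤ (b - a - 1) / s := Int.ediv_nonneg hd (by omega)
    omega
  by_cases h2 : a + s < b
  · have hc2 : (b - (a + s) + s - 1) / s = (b - a - 1) / s := by ring_nf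
    simp only [if_pos hab, if_pos h2, hc1, hc2, List.range_succ_eq_map, List.map_cons,
      List.map_map]
    congr 1
    · push_cast; ring
    · apply List.map_congr_left
      intro k _
      simp only [Function.comp_apply]
      push_cast
      ring
  · -- tail empty: b - a - 1 < s, so (b - a - 1) / s = 0
    have hdiv0 : (b - a - 1) / s = 0 := Int.ediv_eq_zero_of_lt hd (by omega)
    simp only [if_pos hab, if_neg h2, hc1, hdiv0]
    simp

-- pen counts mixed pairs: pen l = count 'x' * (len - count 'x')
lemma pvPen_eq (l : List Char) :
    pvPen l = (l.count 'x' : Int) * ((l.length : Int) - (l.count 'x' : Int)) := by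
  induction l with
  | nil => simp [pvPen]
  | cons h t ih =>
    by_cases hx : h = 'x'
    · subst hx
      have hcp : t.countP (fun c => (c == 'x') != ('x' == 'x')) =
          t.countP (fun a => decide ¬((a == 'x') = true)) :=
        List.countP_congr (by intro c _; simp)
      have hlen : t.countP (fun a => decide ¬((a == 'x') = true)) = t.length - t.count 'x' := by
        have := List.length_eq_countP_add_countP (p := (· == 'x')) (l := t)
        simp only [List.count] at *
        omega
      have hle : t.count 'x' ≤ t.length := List.count_le_length
      simp only [pvPen, hcp, hlen, ih, List.count_cons_self, List.length_cons]
      push_cast [Nat.cast_sub hle]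
      ring
    · have hcp : t.countP (fun c => (c == 'x') != (h == 'x')) = t.count 'x' := by
        rw [List.count]
        exact List.countP_congr (by intro c _; simp [hx])
      have hcnt : (h :: t).count 'x' = t.count 'x' := by
        rw [List.count_cons_of_ne (by simp [hx])]
      simp only [pvPen, hcp, ih, hcnt, List.length_cons]
      push_cast
      ring

-- table identity: for xes ≤ 2 and a scoring char, points[xes][c] = base[c] - xes
lemma pvLookup_eq_base (k : Nat) (hk : k ≤ 2) (c : Char)
    (hc : c = 'A' ∨ c = 'B' ∨ c = 'C' ∨ c = 'D') :
    pvLookupA (k : Int) c = PySem.Dict.getD pvBaseB c 0 - (k : Int) := by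
  interval_cases k <;> rcases hc with rfl | rfl | rfl | rfl <;> decide

-- the ite-sum A accumulates equals the full base sum minus x * (#non-x), given the table identity
lemma pvIteSum (x : Int)
    (hx : ∀ c, c = 'A' ∨ c = 'B' ∨ c = 'C' ∨ c = 'D' →
          pvLookupA x c = PySem.Dict.getD pvBaseB c 0 - x) :
    ∀ l : List Char, (∀ c ∈ l, c = 'A' ∨ c = 'B' ∨ c = 'C' ∨ c = 'D' ∨ c = 'x') →
    (l.map (fun c => if c ≠ 'x' then pvLookupA x c else 0)).sum
      = (l.map (fun c => PySem.Dict.getD pvBaseB c 0)).sum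
        - x * ((l.length : Int) - (l.count 'x' : Int)) := by
  intro l hl
  induction l with
  | nil => simp
  | cons c l ih =>
    have hc := hl c (by simp)
    have ih' := ih (fun d hd => hl d (by simp [hd]))
    by_cases hcx : c = 'x'
    · subst hcx
      have hb : PySem.Dict.getD pvBaseB 'x' 0 = 0 := by decide
      simp [hb] at ih' ⊢
      rw [ih']
    · have hc' : c = 'A' ∨ c = 'B' ∨ c = 'C' ∨ c = 'D' := by tauto
      simp [hcx, hx c hc'] at ih' ⊢
      rw [ih']
      ring

-- per-chunk equality: for a chunk of at most 3 allowed characters, A's chunk = B's chunk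
lemma pvChunk_eq (l : List Char) (hl : ∀ c ∈ l, c = 'A' ∨ c = 'B' ∨ c = 'C' ∨ c = 'D' ∨ c = 'x')
    (hlen : l.length ≤ 3) :
    (l.map (fun c => if c ≠ 'x' then pvLookupA (l.count 'x' : Int) c else 0)).sum
      = (l.map (fun c => PySem.Dict.getD pvBaseB c 0)).sum - pvPen l := by
  rw [pvPen_eq]
  by_cases hall : ∀ c ∈ l, c = 'x'
  · -- all-x chunk: both sides are the base sum (which is 0) resp. 0
    have hcnt : l.count 'x' = l.length := List.count_eq_length.mpr (by
      intro c hc; simpa [eq_comm] using hall c hc)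
    have hb : PySem.Dict.getD pvBaseB 'x' 0 = 0 := by decide
    have hz : ∀ (f : Char → Int), (l.map (fun c => if c = 'x' then 0 else f c)).sum = 0 := by
      intro f
      apply List.sum_eq_zero
      intro v hv
      obtain ⟨c, hc, rfl⟩ := List.mem_map.mp hv
      simp [hall c hc]
    have hzb : (l.map (fun c => PySem.Dict.getD pvBaseB c 0)).sum = 0 := by
      apply List.sum_eq_zero
      intro v hv
      obtain ⟨c, hc, rfl⟩ := List.mem_map.mp hv
      simp [hall c hc, hb]
    simp [hcnt, hzb, hz]
  · -- some scoring char: count 'x' ≤ 2, so the table identity applies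
    push Not at hall
    obtain ⟨c₀, hc₀, hc₀x⟩ := hall
    have hcnt2 : l.count 'x' ≤ 2 := by
      have hle : l.count 'x' ≤ l.length := List.count_le_length
      have hne : l.count 'x' ≠ l.length := by
        intro h
        exact hc₀x (by simpa [eq_comm] using List.count_eq_length.mp h c₀ hc₀)
      omega
    exact pvIteSum _ (fun c hc => pvLookup_eq_base _ hcnt2 c hc) l hl

-- A's fold is the sum of its chunk contributions
lemma pvA_eq_sum (cs : List Char) :
    (PySem.List.pyRange 0 (PySem.List.len cs) 3).foldl
      (fun total i =>
        let trio := PySem.List.slice cs (some i) (some (i + 3))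
        let xes : Int := (PySem.List.count trio 'x' : Int)
        trio.foldl (fun t c => if c ≠ 'x' then t + pvLookupA xes c else t) total)
      0
    = ((PySem.List.pyRange 0 (cs.length : Int) 3).map (pvChunkA cs)).sum := by
  simp only [PySem.List.len_eq, PySem.List.count_eq]
  have h1 : ∀ (init : Int),
      (PySem.List.pyRange 0 (cs.length : Int) 3).foldl
        (fun total i =>
          let trio := PySem.List.slice cs (some i) (some (i + 3))
          (trio.foldl (fun t c => if c ≠ 'x' then t + pvLookupA (trio.count 'x' : Int) c else t)
            total))
        init
      = (PySem.List.pyRange 0 (cs.length : Int) 3).foldl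
          (fun total i => total + pvChunkA cs i) init := by
    intro init
    refine PySem.List.foldl_congr_mem _ _ _ _ ?_
    intro total i _
    simp only [pvChunkA]
    set trio := PySem.List.slice cs (some i) (some (i + 3))
    calc trio.foldl (fun t c => if c ≠ 'x' then t + pvLookupA (trio.count 'x' : Int) c else t) total
        = trio.foldl (fun t c => t + (if c ≠ 'x' then pvLookupA (trio.count 'x' : Int) c else 0))
            total :=
          PySem.List.foldl_congr_mem _ _ _ _ (by intro acc c _; split_ifs <;> simp)
      _ = _ := PySem.List.foldl_add _ _ _
  rw [h1, PySem.List.foldl_add]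
  simp

-- B's while loop is the sum of its chunk contributions from i upward
lemma pvB_eq_sum (cs : List Char) (total i : Int) :
    pvAltLoop cs total i
      = total + ((PySem.List.pyRange i (cs.length : Int) 3).map (pvChunkB cs)).sum := by
  rw [pvAltLoop]
  split_ifs with h
  · rw [pvB_eq_sum cs _ (i + 3), pvRange_cons_of_pos i _ 3 (by norm_num) h]
    simp only [List.map_cons, List.sum_cons, pvChunkB]
    ring
  · rw [PySem.List.pyRange_of_pos _ _ (by norm_num : (0:Int) < 3), if_neg h]
    simp
termination_by ((cs.length : Int) - i).toNat
decreasing_by omega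

theorem potion_master_spec : Claim_equal_potion_master := by
  intro data _ hpre
  have hpre' : ∀ c ∈ data.toList, c = 'A' ∨ c = 'B' ∨ c = 'C' ∨ c = 'D' ∨ c = 'x' := by
    intro c hc
    have h := List.all_eq_true.mp hpre c hc
    simp at h
    tauto
  unfold Spec_potion_master potion_master potion_master_alt
  simp only []
  rw [pvA_eq_sum, pvB_eq_sum]
  rw [Int.zero_add]
  congr 1
  apply List.map_congr_left
  intro i hi
  have hi' : 0 ≤ i := by
    have := (PySem.List.mem_pyRange_iff_of_pos (by norm_num : (0:Int) < 3) i).mp hi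
    omega
  simp only [pvChunkA, pvChunkB]
  set trio := PySem.List.slice data.toList (some i) (some (i + 3)) with htrio
  have hmem : ∀ c ∈ trio, c = 'A' ∨ c = 'B' ∨ c = 'C' ∨ c = 'D' ∨ c = 'x' := by
    intro c hc
    exact hpre' c (PySem.List.mem_of_mem_slice _ _ _ hc)
  have hlen3 : trio.length ≤ 3 := by
    rw [htrio, PySem.List.slice_toNat _ hi' (by omega)]
    have h3 : (i + 3).toNat - i.toNat ≤ 3 := by omega
    calc _ ≤ (i + 3).toNat - i.toNat := List.length_take_le _ _
    _ ≤ 3 := h3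
  exact pvChunk_eq trio hmem hlen3

-- ===== VERDICT: potion_master_spec above proves Claim_equal_potion_master directly =====
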